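-- pv_equiv track=rewrite | github.com/Patato777/AoC-2020 | scripts/AoC2020-18_2.py | find_par
-- ===== SOURCE A (Python) =====
-- def find_par(expr) :
--     par = 0
--     for k,char in enumerate(expr) :
--         if char == '(' :
--             par += 1
--         elif char == ')' :
--             par -= 1
--         if par == -1 :
--             return k
--     return k
-- ===== SOURCE B (Python) =====
-- def find_par(expr):
--     # Two-pass decomposition: first compute the running paren balance after each
--     # character, then scan those balances for the first -1.
--     bal = 0
--     balances = []
--     for char in expr:
--         bal += (char == '(') - (char == ')')
--         balances.append(bal)
--     for k, b in enumerate(balances):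
--         if b == -1:
--             return k
--     return k
-- ===== Notes on version B (the rewrite author's own statement) =====
-- stated objective: alternative
-- what changed: B splits A's single early-returning loop into two passes: it first materialises the list of running paren balances, then enumerates that list for the first balance equal to -1 (falling back to the last index).
import Mathlib
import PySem

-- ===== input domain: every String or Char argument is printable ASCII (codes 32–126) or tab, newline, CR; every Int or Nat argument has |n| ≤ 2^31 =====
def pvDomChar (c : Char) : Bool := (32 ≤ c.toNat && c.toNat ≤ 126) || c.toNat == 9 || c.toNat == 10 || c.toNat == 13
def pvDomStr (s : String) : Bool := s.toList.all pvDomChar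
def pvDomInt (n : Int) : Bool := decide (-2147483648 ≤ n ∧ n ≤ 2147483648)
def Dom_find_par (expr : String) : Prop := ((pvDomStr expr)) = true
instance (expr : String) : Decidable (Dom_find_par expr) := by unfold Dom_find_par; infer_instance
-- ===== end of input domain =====

-- B splits A's single early-returning loop into two passes (balance list, then scan); same cost, different decomposition.
-- ===== PORT A =====
-- A's for-loop over enumerate(expr): one recursion carrying the running `par`
-- and the last index seen (A's `return k` after the loop).
def findParGoA : List (Int × Char) → Int → Int → Int
  | [], _, last => last
  | (k, c) :: rest, par, _ =>
      let par := if c = '(' then par + 1 else if c = ')' then par - 1 else par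
      if par = -1 then k else findParGoA rest par k

def find_par (expr : String) : Int :=
  findParGoA (PySem.List.enumerate expr.toList 0) 0 0

-- ===== PORT B =====
-- B's first loop: the list of running balances after each character.
def findParBal : List Char → Int → List Int
  | [], _ => []
  | c :: rest, bal =>
      let bal := bal + (if c = '(' then 1 else 0) - (if c = ')' then 1 else 0)
      bal :: findParBal rest bal

-- B's second loop: first index whose balance is -1, else the last index.
def findParScan : List (Int × Int) → Int → Int
  | [], last => last
  | (k, b) :: rest, _ => if b = -1 then k else findParScan rest k

def find_par_alt (expr : String) : Int :=
  findParScan (PySem.List.enumerate (findParBal expr.toList 0) 0) 0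

-- ===== PRECONDITION & SPEC =====
-- Pre_ excludes only the empty string, on which A's loop variable k is never bound and A raises NameError.
def Pre_find_par (expr : String) : Prop := expr ≠ ""
instance (expr : String) : Decidable (Pre_find_par expr) := by unfold Pre_find_par; infer_instance
def pvWitness_find_par : String := "(a))"
def Spec_find_par (expr : String) (out : Int) : Prop := out = find_par_alt expr
instance (expr : String) (out : Int) : Decidable (Spec_find_par expr out) := by unfold Spec_find_par; infer_instance

-- ===== CLAIM (what is proved, stated in full; the proofs are below) =====
def Claim_equal_find_par : Prop := ∀ (expr : String), Dom_find_par expr → Pre_find_par expr → Spec_find_par expr (find_par expr)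

-- ===== LEMMAS AND PROOFS =====
theorem findParGoA_eq_scan (l : List Char) :
    ∀ (par : Int) (i last : Int),
      findParGoA (PySem.List.enumerate l i) par last
        = findParScan (PySem.List.enumerate (findParBal l par) i) last := by
  induction l with
  | nil => intro par i last; simp [PySem.List.enumerate_nil, findParGoA, findParBal, findParScan]
  | cons c rest ih =>
      intro par i last
      have hb : findParBal (c :: rest) par
          = (par + (if c = '(' then 1 else 0) - (if c = ')' then 1 else 0))
            :: findParBal rest (par + (if c = '(' then 1 else 0) - (if c = ')' then 1 else 0)) := rfl
      rw [hb, PySem.List.enumerate_cons, PySem.List.enumerate_cons]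
      show (let par' := if c = '(' then par + 1 else if c = ')' then par - 1 else par;
            if par' = -1 then i else findParGoA (PySem.List.enumerate rest (i + 1)) par' i)
          = _
      have hpar : (if c = '(' then par + 1 else if c = ')' then par - 1 else par)
          = par + (if c = '(' then 1 else 0) - (if c = ')' then 1 else 0) := by
        by_cases h1 : c = '(' <;> by_cases h2 : c = ')' <;> simp [h1, h2] <;> omega
      simp only [hpar, findParScan]
      split_ifs <;> first | rfl | exact ih _ (i + 1) i

-- ===== VERDICT (by name: the statement is the Claim_ definition above) =====
theorem find_par_spec : Claim_equal_find_par := by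
  intro expr _ _
  show find_par expr = find_par_alt expr
  unfold find_par find_par_alt
  exact findParGoA_eq_scan expr.toList 0 0 0
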